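-- pv_equiv track=rewrite | github.com/qilimanjaro-tech/qililab | src/qililab/qprogram/qblox_compiler.py | calculate_square_waveform_optimization_values
-- ===== SOURCE A (Python) =====
-- def calculate_square_waveform_optimization_values(duration):
--     def remainder_conditions(chunk_duration):
--         remainder = duration % chunk_duration
--         return remainder, (chunk_duration >= 4 and (remainder == 0 or remainder >= 4))
--
--     def find_chunk_duration(condition_func):
--         for chunk_duration in range(100, 501):
--             if chunk_duration <= duration:
--                 remainder, valid = remainder_conditions(chunk_duration)
--                 if valid and condition_func(remainder):
--                     return chunk_duration
--         return None
--
--     # First try for remainder == 0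
--     final_chunk_duration = find_chunk_duration(lambda rem: rem == 0)
--     if final_chunk_duration is not None:
--         return final_chunk_duration, duration // final_chunk_duration, duration % final_chunk_duration
--
--     # If not found, try for remainder ≥ 4
--     final_chunk_duration = find_chunk_duration(lambda rem: rem >= 4)
--     if final_chunk_duration is not None:
--         return final_chunk_duration, duration // final_chunk_duration, duration % final_chunk_duration
--
--     # If no suitable piece_duration found, fallback to entire duration
--     return duration, 1, 0
-- ===== SOURCE B (Python) =====
-- def calculate_square_waveform_optimization_values(duration):
--     best_zero = None
--     best_four = None
--     for chunk in range(100, 501):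
--         if chunk <= duration:
--             rem = duration % chunk
--             if rem == 0:
--                 if best_zero is None:
--                     best_zero = chunk
--             elif rem >= 4:
--                 if best_four is None:
--                     best_four = chunk
--     chunk = best_zero if best_zero is not None else best_four
--     if chunk is not None:
--         return chunk, duration // chunk, duration % chunk
--     return duration, 1, 0
-- ===== Notes on version B (the rewrite author's own statement) =====
-- stated objective: alternative
-- what changed: Replaces A's two sequential early-return scans of range(100,501) with a single full pass that maintains two running first-seen candidates (best zero-remainder chunk and best remainder>=4 chunk) and picks between them afterwards.
import Mathlib
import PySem

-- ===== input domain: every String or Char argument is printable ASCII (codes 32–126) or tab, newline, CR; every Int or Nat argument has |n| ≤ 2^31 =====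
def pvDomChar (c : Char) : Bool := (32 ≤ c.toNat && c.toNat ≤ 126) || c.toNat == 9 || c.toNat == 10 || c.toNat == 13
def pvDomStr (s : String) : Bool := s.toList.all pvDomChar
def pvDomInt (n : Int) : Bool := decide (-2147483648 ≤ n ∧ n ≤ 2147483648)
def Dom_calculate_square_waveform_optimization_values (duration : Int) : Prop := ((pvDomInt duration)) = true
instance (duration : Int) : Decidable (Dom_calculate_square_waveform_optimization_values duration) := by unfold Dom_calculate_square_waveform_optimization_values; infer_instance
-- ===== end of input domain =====

-- B replaces A's two sequential early-return scans with one pass keeping two first-seen candidates (alternative decomposition, same behaviour).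


-- ===== PORT A =====
-- A's inner helper `remainder_conditions`
def pvA_remainder_conditions (duration chunk : Int) : Int × Bool :=
  let remainder := PySem.Int.mod duration chunk
  (remainder, decide (4 ≤ chunk) && (remainder == 0 || decide (4 ≤ remainder)))

-- A's `find_chunk_duration`: early-return for-loop over the range list
def pvA_find_chunk_duration (duration : Int) (cond : Int → Bool) : List Int → Option Int
  | [] => none
  | c :: rest =>
    if c ≤ duration then
      let rv := pvA_remainder_conditions duration c
      if rv.2 && cond rv.1 then some c
      else pvA_find_chunk_duration duration cond rest
    else pvA_find_chunk_duration duration cond rest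

def calculate_square_waveform_optimization_values (duration : Int) : Int × Int × Int :=
  match pvA_find_chunk_duration duration (fun rem => rem == 0) (PySem.List.pyRange 100 501 1) with
  | some c => (c, PySem.Int.floordiv duration c, PySem.Int.mod duration c)
  | none =>
    match pvA_find_chunk_duration duration (fun rem => decide (4 ≤ rem)) (PySem.List.pyRange 100 501 1) with
    | some c => (c, PySem.Int.floordiv duration c, PySem.Int.mod duration c)
    | none => (duration, 1, 0)

-- ===== PORT B =====
-- B's single loop over the range, threading the two first-seen candidates
def pvB_scan (duration : Int) : List Int → Option Int × Option Int → Option Int × Option Int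
  | [], st => st
  | c :: rest, (bz, bf) =>
    pvB_scan duration rest
      (if c ≤ duration then
        let rem := PySem.Int.mod duration c
        if rem == 0 then (if bz.isNone then some c else bz, bf)
        else if 4 ≤ rem then (bz, if bf.isNone then some c else bf)
        else (bz, bf)
      else (bz, bf))

def calculate_square_waveform_optimization_values_alt (duration : Int) : Int × Int × Int :=
  let st := pvB_scan duration (PySem.List.pyRange 100 501 1) (none, none)
  match st.1.orElse (fun _ => st.2) with
  | some c => (c, PySem.Int.floordiv duration c, PySem.Int.mod duration c)
  | none => (duration, 1, 0)

-- ===== PRECONDITION & SPEC =====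
def Spec_calculate_square_waveform_optimization_values (duration : Int) (out : Int × Int × Int) : Prop := out = calculate_square_waveform_optimization_values_alt duration
instance (duration : Int) (out : Int × Int × Int) : Decidable (Spec_calculate_square_waveform_optimization_values duration out) := by unfold Spec_calculate_square_waveform_optimization_values; infer_instance

-- ===== CLAIM (what is proved, stated in full; the proofs are below) =====
def Claim_equal_calculate_square_waveform_optimization_values : Prop := ∀ (duration : Int), Dom_calculate_square_waveform_optimization_values duration → Spec_calculate_square_waveform_optimization_values duration (calculate_square_waveform_optimization_values duration)

-- ===== LEMMAS AND PROOFS =====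

-- first-match characterisations used to relate the two loop shapes
def pvFZ (duration : Int) : List Int → Option Int
  | [] => none
  | c :: rest => if c ≤ duration ∧ PySem.Int.mod duration c = 0 then some c else pvFZ duration rest

def pvFF (duration : Int) : List Int → Option Int
  | [] => none
  | c :: rest =>
    if c ≤ duration ∧ PySem.Int.mod duration c ≠ 0 ∧ 4 ≤ PySem.Int.mod duration c then some c
    else pvFF duration rest

-- A's first scan finds the first zero-remainder chunk (all chunks in the range are ≥ 4)
lemma pvA_zero_eq (d : Int) (l : List Int) (h : ∀ c ∈ l, 4 ≤ c) :
    pvA_find_chunk_duration d (fun rem => rem == 0) l = pvFZ d l := by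
  induction l with
  | nil => rfl
  | cons c rest ih =>
    have hc : 4 ≤ c := h c (by simp)
    have ih' := ih (fun x hx => h x (by simp [hx]))
    simp only [pvA_find_chunk_duration, pvA_remainder_conditions, pvFZ, ih']
    by_cases h1 : c ≤ d <;> by_cases h2 : PySem.Int.mod d c = 0 <;>
      simp [h1, h2, hc]

-- A's second scan finds the first remainder≥4 chunk
lemma pvA_four_eq (d : Int) (l : List Int) (h : ∀ c ∈ l, 4 ≤ c) :
    pvA_find_chunk_duration d (fun rem => decide (4 ≤ rem)) l = pvFF d l := by
  induction l with
  | nil => rfl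
  | cons c rest ih =>
    have hc : 4 ≤ c := h c (by simp)
    have ih' := ih (fun x hx => h x (by simp [hx]))
    simp only [pvA_find_chunk_duration, pvA_remainder_conditions, pvFF, ih']
    by_cases h1 : c ≤ d <;> by_cases h2 : (4:Int) ≤ PySem.Int.mod d c <;>
      simp [h1, h2, hc] <;> omega

-- B's single scan computes both first matches at once
lemma pvB_scan_eq (d : Int) (l : List Int) : ∀ bz bf : Option Int,
    pvB_scan d l (bz, bf) =
      (bz.orElse (fun _ => pvFZ d l), bf.orElse (fun _ => pvFF d l)) := by
  induction l with
  | nil => intro bz bf; cases bz <;> cases bf <;> rfl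
  | cons c rest ih =>
    intro bz bf
    simp only [pvB_scan, pvFZ, pvFF]
    by_cases h1 : c ≤ d
    · by_cases h2 : PySem.Int.mod d c = 0
      · cases bz <;> simp [h1, h2, ih]
      · by_cases h3 : (4:Int) ≤ PySem.Int.mod d c
        · cases bf <;> simp [h1, h2, h3, ih]
        · simp [h1, h2, h3, ih]
    · simp [h1, ih]

lemma pvRange_ge4 : ∀ c ∈ PySem.List.pyRange 100 501 1, (4:Int) ≤ c := by
  intro c hc
  rw [PySem.List.mem_pyRange_one] at hc
  omega

-- ===== VERDICT (by name: the statement is the Claim_ definition above) =====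
theorem calculate_square_waveform_optimization_values_spec : Claim_equal_calculate_square_waveform_optimization_values := by
  intro d _
  unfold Spec_calculate_square_waveform_optimization_values
  unfold calculate_square_waveform_optimization_values calculate_square_waveform_optimization_values_alt
  rw [pvA_zero_eq d _ pvRange_ge4, pvA_four_eq d _ pvRange_ge4, pvB_scan_eq]
  cases pvFZ d (PySem.List.pyRange 100 501 1) <;>
    cases pvFF d (PySem.List.pyRange 100 501 1) <;> rfl
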